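-- pv_equiv track=rewrite | github.com/AhmedHosniFahmi/AES-128-256-bits_implementation_for_Strings | AES.py | inputKey
-- ===== SOURCE A (Python) =====
-- def inputKey(key: str) -> list:
--     """
--     take the key as a string of hexadecimal and convert it
--     to a matrix 4×4 consists of 4 col every col is 4 bytes
--     :param key: str
--     :return:
--     matrix (list of cols)
--     """
--     colList, matrix = [], []
--     for i in range(0, len(key), 2):
--         colList.append(key[i:i + 2])
--
--         if len(colList) == 4:
--             matrix.append(colList)
--             colList = []
--
--     return matrix
-- ===== SOURCE B (Python) =====
-- def inputKey(key: str) -> list: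
--     pairs = [key[i:i + 2] for i in range(0, len(key), 2)]
--     n = len(pairs) // 4
--     return [pairs[j * 4:j * 4 + 4] for j in range(n)]
-- ===== Notes on version B (the rewrite author's own statement) =====
-- stated objective: simpler
-- what changed: Replaces A's accumulate-and-reset column counter with flatten-then-reshape: build the flat list of 2-char pairs once, then slice it into len(pairs)//4 complete columns.
import Mathlib
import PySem

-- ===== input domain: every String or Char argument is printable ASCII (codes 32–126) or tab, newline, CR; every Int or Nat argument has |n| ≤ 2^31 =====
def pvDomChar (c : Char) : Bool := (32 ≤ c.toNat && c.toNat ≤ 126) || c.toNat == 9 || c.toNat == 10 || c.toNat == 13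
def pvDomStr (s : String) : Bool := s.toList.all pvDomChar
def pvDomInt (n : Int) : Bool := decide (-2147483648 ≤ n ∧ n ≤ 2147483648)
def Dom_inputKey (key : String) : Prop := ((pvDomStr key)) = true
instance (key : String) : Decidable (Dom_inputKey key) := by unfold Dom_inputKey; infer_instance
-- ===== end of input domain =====

-- B replaces A's accumulate-and-reset column loop by flatten-then-reshape (all pairs, then slice whole columns); objective: simpler.

-- ===== PORT A =====
def inputKey (key : String) : List (List String) :=
  let r := (PySem.List.pyRange 0 (PySem.Str.len key) 2).foldl
    (fun (st : List String × List (List String)) i =>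
      let colList := st.1 ++ [PySem.Str.slice key (some i) (some (i + 2))]
      if colList.length = 4 then ([], st.2 ++ [colList]) else (colList, st.2))
    ([], [])
  r.2

-- ===== PORT B =====
def inputKey_alt (key : String) : List (List String) :=
  let pairs := (PySem.List.pyRange 0 (PySem.Str.len key) 2).map
    (fun i => PySem.Str.slice key (some i) (some (i + 2)))
  let n := PySem.Int.floordiv (PySem.List.len pairs) 4
  (PySem.List.pyRange 0 n 1).map (fun j => PySem.List.slice pairs (some (j * 4)) (some (j * 4 + 4)))

-- ===== PRECONDITION & SPEC =====
def Spec_inputKey (key : String) (out : List (List String)) : Prop := out = inputKey_alt key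
instance (key : String) (out : List (List String)) : Decidable (Spec_inputKey key out) := by unfold Spec_inputKey; infer_instance

-- ===== CLAIM (what is proved, stated in full; the proofs are below) =====
def Claim_equal_inputKey : Prop := ∀ (key : String), Dom_inputKey key → Spec_inputKey key (inputKey key)

-- ===== LEMMAS AND PROOFS =====

-- reference chunking: complete groups of 4, tail dropped
def chunk4 : List String → List (List String)
  | a :: b :: c :: d :: rest => [a, b, c, d] :: chunk4 rest
  | _ => []

def stepA (st : List String × List (List String)) (p : String) :
    List String × List (List String) :=
  if (st.1 ++ [p]).length = 4 then ([], st.2 ++ [st.1 ++ [p]]) else (st.1 ++ [p], st.2)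

theorem foldA_chunk4 (ps : List String) : ∀ (col : List String) (mat : List (List String)),
    col.length ≤ 3 → (ps.foldl stepA (col, mat)).2 = mat ++ chunk4 (col ++ ps) := by
  induction ps with
  | nil =>
    intro col mat h
    rcases col with _ | ⟨a, _ | ⟨b, _ | ⟨c, _ | ⟨d, t⟩⟩⟩⟩
    · simp [chunk4]
    · simp [chunk4]
    · simp [chunk4]
    · simp [chunk4]
    · simp at h; omega
  | cons p ps ih =>
    intro col mat h
    rcases col with _ | ⟨a, _ | ⟨b, _ | ⟨c, _ | ⟨d, t⟩⟩⟩⟩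
    · simpa [stepA, List.foldl_cons] using ih [p] mat (by simp)
    · simpa [stepA, List.foldl_cons] using ih [a, p] mat (by simp)
    · simpa [stepA, List.foldl_cons] using ih [a, b, p] mat (by simp)
    · have := ih [] (mat ++ [[a, b, c, p]]) (by simp)
      simpa [stepA, List.foldl_cons, chunk4] using this
    · simp at h; omega

theorem reshape_chunk4 (ps : List String) :
    (List.range (ps.length / 4)).map (fun k => (ps.drop (k * 4)).take 4) = chunk4 ps := by
  match ps with
  | a :: b :: c :: d :: rest =>
    have hlen : (a :: b :: c :: d :: rest).length / 4 = rest.length / 4 + 1 := by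
      simp [List.length_cons]; omega
    rw [hlen, List.range_succ_eq_map, List.map_cons, List.map_map]
    have htail : ((fun k => List.take 4 (List.drop (k * 4) (a :: b :: c :: d :: rest))) ∘ Nat.succ)
        = (fun k => List.take 4 (List.drop (k * 4) rest)) := by
      funext k
      simp only [Function.comp_apply, Nat.succ_eq_add_one]
      rw [show (k + 1) * 4 = k * 4 + 1 + 1 + 1 + 1 from by ring]
      simp only [List.drop_succ_cons]
    rw [htail, reshape_chunk4 rest]
    simp [chunk4]
  | [] => simp [chunk4]
  | [a] => simp [chunk4]
  | [a, b] => simp [chunk4]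
  | [a, b, c] => simp [chunk4]

theorem slice_reshape (ps : List String) :
    (PySem.List.pyRange 0 (PySem.Int.floordiv (PySem.List.len ps) 4) 1).map
      (fun j => PySem.List.slice ps (some (j * 4)) (some (j * 4 + 4))) = chunk4 ps := by
  have hfd : PySem.Int.floordiv (PySem.List.len ps) 4 = ((ps.length / 4 : Nat) : Int) := by
    simp [PySem.List.len_eq]
  rw [hfd, PySem.List.pyRange_one, List.map_map, ← reshape_chunk4 ps]
  have hn : (((ps.length / 4 : Nat) : Int) - 0).toNat = ps.length / 4 := by omega
  rw [hn]
  apply List.map_congr_left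
  intro k _
  simp only [Function.comp]
  rw [show ((0 : Int) + (k : Nat)) * 4 = ((k * 4 : Nat) : Int) from by push_cast; ring,
      show ((k * 4 : Nat) : Int) + 4 = ((k * 4 + 4 : Nat) : Int) from by push_cast; ring,
      PySem.List.slice_natCast,
      show k * 4 + 4 - k * 4 = 4 from by omega]

-- ===== VERDICT (by name: the statement is the Claim_ definition above) =====
theorem inputKey_spec : Claim_equal_inputKey := by
  intro key _
  unfold Spec_inputKey inputKey inputKey_alt
  dsimp only
  rw [slice_reshape]
  have h := foldA_chunk4
    ((PySem.List.pyRange 0 (PySem.Str.len key) 2).map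
      (fun i => PySem.Str.slice key (some i) (some (i + 2)))) [] [] (by simp)
  rw [List.foldl_map] at h
  simpa [stepA] using h
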